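-- pv_equiv track=rewrite | github.com/Jakeman582/chessboard_polynomials | chessboard_polynomials.py | diagonalize_board
-- ===== SOURCE A (Python) =====
-- def diagonalize_coordinate(board, row, column):
--
--     rows = len(board)
--     columns = len(board[0])
--
--     positive_diagonal = -1
--     negative_diagonal = -1
--
--     # Identifying which positive diagonal this cell is on
--     positive_diagonal = column + row
--
--     # Identifying the negative diagonal this cell is on
--     negative_diagonal = (rows - 1 - row) + column
--
--     return (positive_diagonal, negative_diagonal)
--
-- def diagonalize_board(board):
--
--     rows = len(board)
--     columns = len(board[0])
--
--     number_positive_diagonals = rows + columns - 1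
--     number_negative_diagonals = rows + columns - 1
--
--     diagonal_board = []
--     for i in range(number_positive_diagonals):
--         diagonal_board.append([])
--         for j in range(number_negative_diagonals):
--             diagonal_board[i].append('0')
--
--     for row in range(rows):
--         for column in range(columns):
--             if board[row][column] == '1':
--                 coordinates = diagonalize_coordinate(board, row, column)
--                 diagonal_board[coordinates[0]][coordinates[1]] = '1'
--
--     return diagonal_board
-- ===== SOURCE B (Python) =====
-- def diagonalize_board(board):
--     rows = len(board)
--     columns = len(board[0])
--     n = rows + columns - 1
--
--     def cell(i, j):
--         s = i + j - (rows - 1)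
--         if s % 2 != 0:
--             return '0'
--         col = s // 2
--         row = i - col
--         if 0 <= col < columns and 0 <= row < rows and board[row][col] == '1':
--             return '1'
--         return '0'
--
--     return [[cell(i, j) for j in range(n)] for i in range(n)]
-- ===== Notes on version B (the rewrite author's own statement) =====
-- stated objective: alternative
-- what changed: B replaces A's scatter (pre-build a zero grid, then write '1' into it for every '1' source cell) with a gather that builds each output cell directly by inverting the diagonal coordinate map (col = (i+j-(rows-1))/2, row = i-col, with parity and bounds checks).
import Mathlib
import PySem

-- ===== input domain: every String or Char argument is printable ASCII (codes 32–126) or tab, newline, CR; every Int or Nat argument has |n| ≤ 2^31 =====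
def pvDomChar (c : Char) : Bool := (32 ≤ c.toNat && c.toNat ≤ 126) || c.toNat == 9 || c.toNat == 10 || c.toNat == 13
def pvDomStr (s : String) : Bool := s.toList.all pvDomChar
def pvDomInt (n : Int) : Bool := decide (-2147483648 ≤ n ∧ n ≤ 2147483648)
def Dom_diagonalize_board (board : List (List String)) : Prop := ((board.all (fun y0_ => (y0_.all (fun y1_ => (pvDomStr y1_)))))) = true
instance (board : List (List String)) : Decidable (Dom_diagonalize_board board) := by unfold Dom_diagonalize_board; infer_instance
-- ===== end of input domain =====

-- B replaces A's scatter-into-a-prezeroed-grid with a gather that decides each output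
-- cell independently by inverting the diagonal coordinate map (objective: alternative).

-- board[row][col] == '1'  (the literal membership test both Pythons perform;
-- pyGet? returns none exactly where Python raises IndexError — excluded by Pre_)
def pvHit (board : List (List String)) (row col : Int) : Bool :=
  ((PySem.List.pyGet? board row).bind (fun r => PySem.List.pyGet? r col)) == some "1"

-- ===== PORT A =====
def diagonalize_coordinate (board : List (List String)) (row column : Int) : Int × Int :=
  let rows : Int := board.length
  -- Python also computes 'columns = len(board[0])', unused; the helper is only ever
  -- called with board ≠ [] so that line cannot raise and is omitted
  let positive_diagonal : Int := column + row
  let negative_diagonal : Int := (rows - 1 - row) + column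
  (positive_diagonal, negative_diagonal)

def diagonalize_board (board : List (List String)) : List (List String) :=
  match PySem.List.pyGet? board 0 with
  | none => []  -- 'len(board[0])' raises IndexError on []; outside Pre_
  | some row0 =>
    let rows : Int := board.length
    let columns : Int := row0.length
    let number_positive_diagonals : Int := rows + columns - 1
    let number_negative_diagonals : Int := rows + columns - 1
    let diagonal_board : List (List String) :=
      (PySem.List.pyRange 0 number_positive_diagonals 1).foldl (fun acc _ =>
        acc ++ [(PySem.List.pyRange 0 number_negative_diagonals 1).foldl
                  (fun r _ => r ++ ["0"]) []]) []
    (PySem.List.pyRange 0 rows 1).foldl (fun g row =>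
      (PySem.List.pyRange 0 columns 1).foldl (fun g col =>
        if pvHit board row col then
          let coordinates := diagonalize_coordinate board row col
          -- the assignment indices are always in range here, so pySetD/pyGetD are exact
          PySem.List.pySetD g coordinates.1
            (PySem.List.pySetD (PySem.List.pyGetD g coordinates.1 []) coordinates.2 "1")
        else g) g) diagonal_board

-- ===== PORT B =====
def pvCell (board : List (List String)) (rows columns : Int) (i j : Int) : String :=
  let s : Int := i + j - (rows - 1)
  if PySem.Int.mod s 2 != 0 then "0"
  else
    let col : Int := PySem.Int.floordiv s 2
    let row : Int := i - col
    if 0 ≤ col ∧ col < columns ∧ 0 ≤ row ∧ row < rows ∧ pvHit board row col = true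
    then "1" else "0"

def diagonalize_board_alt (board : List (List String)) : List (List String) :=
  match PySem.List.pyGet? board 0 with
  | none => []  -- 'len(board[0])' raises IndexError on []; outside Pre_
  | some row0 =>
    let rows : Int := board.length
    let columns : Int := row0.length
    let n : Int := rows + columns - 1
    (PySem.List.pyRange 0 n 1).map (fun i =>
      (PySem.List.pyRange 0 n 1).map (fun j => pvCell board rows columns i j))

-- ===== PRECONDITION & SPEC =====
-- Pre_ excludes exactly the inputs on which Python A raises IndexError:
-- the empty board (len(board[0])) and boards with a row shorter than row 0
-- (board[row][column] for column < len(board[0])).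
def Pre_diagonalize_board (board : List (List String)) : Prop :=
  board ≠ [] ∧ ∀ r ∈ board, (board.headD []).length ≤ r.length
instance (board : List (List String)) : Decidable (Pre_diagonalize_board board) := by
  unfold Pre_diagonalize_board; infer_instance

def pvWitness_diagonalize_board : List (List String) := [["1", "0"], ["0", "1"]]

def Spec_diagonalize_board (board : List (List String)) (out : List (List String)) : Prop := out = diagonalize_board_alt board
instance (board : List (List String)) (out : List (List String)) : Decidable (Spec_diagonalize_board board out) := by unfold Spec_diagonalize_board; infer_instance

-- ===== CLAIM (what is proved, stated in full; the proofs are below) =====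
def Claim_equal_diagonalize_board : Prop := ∀ (board : List (List String)), Dom_diagonalize_board board → Pre_diagonalize_board board → Spec_diagonalize_board board (diagonalize_board board)

-- ===== LEMMAS AND PROOFS =====

-- an n×n grid whose (i,j) cell is "1" exactly when Q i j holds
def pvGrid (n : Int) (Q : Int → Int → Bool) : List (List String) :=
  (PySem.List.pyRange 0 n 1).map (fun i =>
    (PySem.List.pyRange 0 n 1).map (fun j => if Q i j then "1" else "0"))

theorem pvGrid_congr {n : Int} {Q Q' : Int → Int → Bool}
    (h : ∀ i j, 0 ≤ i → i < n → 0 ≤ j → j < n → Q i j = Q' i j) :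
    pvGrid n Q = pvGrid n Q' := by
  unfold pvGrid
  apply List.map_congr_left
  intro i hi
  rw [PySem.List.mem_pyRange_one] at hi
  apply List.map_congr_left
  intro j hj
  rw [PySem.List.mem_pyRange_one] at hj
  rw [h i j hi.1 hi.2 hj.1 hj.2]

theorem pv_set_map_pyRange {α : Type} (f : Int → α) (n b : Int) (hb : 0 ≤ b) (v : α) :
    ((PySem.List.pyRange 0 n 1).map f).set b.toNat v
      = (PySem.List.pyRange 0 n 1).map (fun j => if j = b then v else f j) := by
  apply List.ext_getElem
  · simp
  · intro k h1 h2
    simp only [List.length_set, List.length_map, PySem.List.length_pyRange_one] at h1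
    rw [List.getElem_set, List.getElem_map, List.getElem_map,
        PySem.List.getElem_pyRange_one]
    split_ifs <;> first | rfl | omega

-- Python's 'diagonal_board[a][b] = "1"' on a pvGrid turns Q on at (a, b)
theorem pvGrid_set (n : Int) (Q : Int → Int → Bool) (a b : Int)
    (ha : 0 ≤ a) (ha' : a < n) (hb : 0 ≤ b) :
    PySem.List.pySetD (pvGrid n Q) a
        (PySem.List.pySetD (PySem.List.pyGetD (pvGrid n Q) a []) b "1")
      = pvGrid n (fun i j => Q i j || (i == a && j == b)) := by
  unfold pvGrid
  rw [PySem.List.pyGetD_map_pyRange_of_nonneg _ n a _ ha ha',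
      PySem.List.pySetD_of_nonneg _ _ hb,
      PySem.List.pySetD_of_nonneg _ _ ha,
      pv_set_map_pyRange _ n b hb,
      pv_set_map_pyRange _ n a ha]
  apply List.map_congr_left
  intro i hi
  rw [PySem.List.mem_pyRange_one] at hi
  by_cases hia : i = a
  · subst hia
    rw [if_pos rfl]
    apply List.map_congr_left
    intro j hj
    by_cases hjb : j = b <;> simp [hjb]
  · simp only [if_neg hia]
    apply List.map_congr_left
    intro j hj
    have : (i == a) = false := by simp [hia]
    simp [this]

-- A's inner loop (one source row) on a pvGrid, characterised
theorem pv_scatter_inner (board : List (List String)) (C : Int) (row : Int)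
    (hr0 : 0 ≤ row) (hr1 : row < (board.length : Int)) :
    ∀ (cs : List Int) (Q : Int → Int → Bool), (∀ c ∈ cs, 0 ≤ c ∧ c < C) →
    cs.foldl (fun g col =>
        if pvHit board row col then
          let coordinates := diagonalize_coordinate board row col
          PySem.List.pySetD g coordinates.1
            (PySem.List.pySetD (PySem.List.pyGetD g coordinates.1 []) coordinates.2 "1")
        else g) (pvGrid ((board.length : Int) + C - 1) Q)
      = pvGrid ((board.length : Int) + C - 1) (fun i j => Q i j ||
          cs.any (fun col => pvHit board row col &&
            (i == col + row) && (j == ((board.length : Int) - 1 - row) + col))) := by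
  intro cs
  induction cs with
  | nil => intro Q _; simp
  | cons c cs ih =>
    intro Q hmem
    have hc := hmem c (by simp)
    simp only [diagonalize_coordinate] at ih ⊢
    rw [List.foldl_cons]
    by_cases hhit : pvHit board row c = true
    · simp only [hhit, if_true]
      rw [pvGrid_set _ _ _ _ (by omega) (by omega) (by omega)]
      rw [ih _ (fun x hx => hmem x (by simp [hx]))]
      apply pvGrid_congr
      intro i j _ _ _ _
      simp [hhit, Bool.or_assoc]
    · have h0 : pvHit board row c = false := by simpa using hhit
      rw [if_neg hhit, ih _ (fun x hx => hmem x (by simp [hx]))]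
      apply pvGrid_congr
      intro i j _ _ _ _
      simp [h0]

-- A's double scatter loop on a pvGrid, characterised
theorem pv_scatter_outer (board : List (List String)) (C : Int) :
    ∀ (rs : List Int) (Q : Int → Int → Bool), (∀ r ∈ rs, 0 ≤ r ∧ r < (board.length : Int)) →
    rs.foldl (fun g row =>
      (PySem.List.pyRange 0 C 1).foldl (fun g col =>
        if pvHit board row col then
          let coordinates := diagonalize_coordinate board row col
          PySem.List.pySetD g coordinates.1
            (PySem.List.pySetD (PySem.List.pyGetD g coordinates.1 []) coordinates.2 "1")
        else g) g) (pvGrid ((board.length : Int) + C - 1) Q)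
      = pvGrid ((board.length : Int) + C - 1) (fun i j => Q i j ||
          rs.any (fun row => (PySem.List.pyRange 0 C 1).any (fun col =>
            pvHit board row col &&
            (i == col + row) && (j == ((board.length : Int) - 1 - row) + col)))) := by
  intro rs
  induction rs with
  | nil => intro Q _; simp
  | cons r rs ih =>
    intro Q hmem
    have hr := hmem r (by simp)
    rw [List.foldl_cons,
        pv_scatter_inner board C r hr.1 hr.2 (PySem.List.pyRange 0 C 1) Q
          (fun c hc => by rw [PySem.List.mem_pyRange_one] at hc; exact hc),
        ih _ (fun x hx => hmem x (by simp [hx]))]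
    apply pvGrid_congr
    intro i j _ _ _ _
    simp [Bool.or_assoc]

-- the arithmetic core: B's inverted-map gather decides exactly A's scatter predicate
theorem pv_cell_eq (board : List (List String)) (C : Int) (i j : Int) :
    (if ((PySem.List.pyRange 0 (board.length : Int) 1).any (fun row =>
          (PySem.List.pyRange 0 C 1).any (fun col =>
            pvHit board row col &&
            (i == col + row) && (j == ((board.length : Int) - 1 - row) + col))))
      then "1" else "0")
    = pvCell board (board.length : Int) C i j := by
  simp only [pvCell]
  set R : Int := (board.length : Int) with hR
  set s : Int := i + j - (R - 1) with hs
  by_cases hm : PySem.Int.mod s 2 = 0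
  · have hemod : s % 2 = 0 := by
      rw [PySem.Int.mod_eq_emod_of_pos (by norm_num)] at hm; exact hm
    have hfd : PySem.Int.floordiv s 2 = s / 2 :=
      PySem.Int.floordiv_eq_ediv_of_pos (by norm_num)
    have hne : ¬ ((PySem.Int.mod s 2 != 0) = true) := by
      simp
      exact Int.dvd_of_emod_eq_zero hemod
    rw [if_neg hne, hfd]
    by_cases hcond : (0 ≤ s / 2 ∧ s / 2 < C ∧ 0 ≤ i - s / 2 ∧ i - s / 2 < R ∧
        pvHit board (i - s / 2) (s / 2) = true)
    · rw [if_pos hcond, if_pos]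
      rw [List.any_eq_true]
      refine ⟨i - s / 2, ?_, ?_⟩
      · rw [PySem.List.mem_pyRange_one]; omega
      · rw [List.any_eq_true]
        refine ⟨s / 2, ?_, ?_⟩
        · rw [PySem.List.mem_pyRange_one]; omega
        · have h1 : (i == s / 2 + (i - s / 2)) = true := by simp
          have h2 : (j == R - 1 - (i - s / 2) + s / 2) = true := by
            rw [beq_iff_eq]; omega
          rw [hcond.2.2.2.2, h1, h2]; rfl
    · rw [if_neg hcond, if_neg]
      rw [List.any_eq_true]
      rintro ⟨row, hrow, hp⟩
      rw [PySem.List.mem_pyRange_one] at hrow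
      rw [List.any_eq_true] at hp
      obtain ⟨col, hcol, hq⟩ := hp
      rw [PySem.List.mem_pyRange_one] at hcol
      rw [Bool.and_eq_true, Bool.and_eq_true, beq_iff_eq, beq_iff_eq] at hq
      obtain ⟨⟨hhit, hieq⟩, hjeq⟩ := hq
      have hcol' : s / 2 = col := by omega
      have hrow' : i - s / 2 = row := by omega
      exact hcond ⟨by omega, by omega, by omega, by omega, by rw [hrow', hcol']; exact hhit⟩
  · have hne : ((PySem.Int.mod s 2 != 0) = true) := by simpa using hm
    rw [if_pos hne, if_neg]
    rw [List.any_eq_true]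
    rintro ⟨row, hrow, hp⟩
    rw [List.any_eq_true] at hp
    obtain ⟨col, hcol, hq⟩ := hp
    rw [Bool.and_eq_true, Bool.and_eq_true, beq_iff_eq, beq_iff_eq] at hq
    obtain ⟨⟨hhit, hieq⟩, hjeq⟩ := hq
    apply hm
    rw [PySem.Int.mod_eq_zero_iff_dvd]
    exact ⟨col, by omega⟩

-- ===== VERDICT (by name: the statement is the Claim_ definition above) =====
theorem diagonalize_board_spec : Claim_equal_diagonalize_board := by
  intro board _ hpre
  unfold Spec_diagonalize_board
  obtain ⟨hne, -⟩ := hpre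
  obtain ⟨r0, rest, rfl⟩ : ∃ r0 rest, board = r0 :: rest := by
    cases board with
    | nil => exact absurd rfl hne
    | cons a l => exact ⟨a, l, rfl⟩
  have hget : PySem.List.pyGet? (r0 :: rest) 0 = some r0 := by simp [pysem]
  simp only [diagonalize_board, diagonalize_board_alt, hget]
  set n : Int := ((r0 :: rest).length : Int) + (r0.length : Int) - 1 with hn
  have hinner : List.foldl (fun r _ => r ++ ["0"]) ([] : List String)
      (PySem.List.pyRange 0 n 1) = (PySem.List.pyRange 0 n 1).map (fun _ => "0") := by
    rw [PySem.List.foldl_append_singleton_eq_map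
      (fun _ => ("0" : String)) (PySem.List.pyRange 0 n 1) [], List.nil_append]
  rw [hinner]
  have hg0 : List.foldl (fun acc _ =>
      acc ++ [(PySem.List.pyRange 0 n 1).map (fun _ => ("0" : String))])
      ([] : List (List String)) (PySem.List.pyRange 0 n 1)
      = pvGrid n (fun _ _ => false) := by
    rw [PySem.List.foldl_append_singleton_eq_map
      (fun _ => (PySem.List.pyRange 0 n 1).map (fun _ => ("0" : String)))
      (PySem.List.pyRange 0 n 1) [], List.nil_append]
    simp [pvGrid]
  rw [hg0,
      pv_scatter_outer (r0 :: rest) (r0.length : Int)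
        (PySem.List.pyRange 0 ((r0 :: rest).length : Int) 1) (fun _ _ => false)
        (fun x hx => by rw [PySem.List.mem_pyRange_one] at hx; exact hx)]
  unfold pvGrid
  apply List.map_congr_left
  intro i _
  apply List.map_congr_left
  intro j _
  simp only [Bool.false_or]
  exact pv_cell_eq (r0 :: rest) (r0.length : Int) i j
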